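-- pv_equiv track=rewrite | github.com/thuurzz/Python | impacta_1sem/AC4_tec_prog/ex02.py | checa_quantidade_divisores
-- ===== SOURCE A (Python) =====
-- def checa_quantidade_divisores(n, qtd):
--     i = 1
--     tem_div = False
--     qtd_div = 0
--
--     while i <= n:
--         if n % i == 0:
--             qtd_div += 1
--
--         i += 1
--
--     if qtd_div == qtd:
--         tem_div = True
--
--     return tem_div
-- ===== SOURCE B (Python) =====
-- def checa_quantidade_divisores(n, qtd):
--     small = []
--     i = 1
--     while i * i <= n:
--         if n % i == 0:
--             small.append(i)
--         i += 1
--     total = 2 * len(small)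
--     if small and small[-1] * small[-1] == n:
--         total -= 1
--     return total == qtd
-- ===== Notes on version B (the rewrite author's own statement) =====
-- stated objective: faster
-- what changed: collects the divisors up to sqrt(n) into a list in one pass, then derives the total divisor count as 2*len(list) minus a perfect-square correction read off the last (largest) small divisor, instead of testing every i from 1 to n
import Mathlib
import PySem

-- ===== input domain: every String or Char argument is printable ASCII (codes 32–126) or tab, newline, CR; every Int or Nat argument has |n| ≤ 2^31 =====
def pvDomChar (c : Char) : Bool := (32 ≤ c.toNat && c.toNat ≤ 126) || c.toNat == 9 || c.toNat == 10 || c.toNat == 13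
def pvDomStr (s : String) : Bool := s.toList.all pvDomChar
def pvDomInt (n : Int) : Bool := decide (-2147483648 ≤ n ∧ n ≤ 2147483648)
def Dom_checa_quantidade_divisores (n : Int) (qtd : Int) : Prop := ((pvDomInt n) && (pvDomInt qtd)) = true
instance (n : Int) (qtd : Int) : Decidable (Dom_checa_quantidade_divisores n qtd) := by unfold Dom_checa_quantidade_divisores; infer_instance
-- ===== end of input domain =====

-- B gathers the small divisors (≤ sqrt n) into a list and derives the count from its
-- length and last element: O(sqrt n) instead of A's O(n) scan of every candidate.

-- ===== PORT A =====
-- A's while loop: i from 1 while i <= n, incrementing a counter when n % i == 0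
def pvLoopA (n : Int) (i : Int) (qtd_div : Int) : Int :=
  if i ≤ n then
    pvLoopA n (i + 1) (if PySem.Int.mod n i = 0 then qtd_div + 1 else qtd_div)
  else qtd_div
termination_by (n + 1 - i).toNat
decreasing_by omega

def checa_quantidade_divisores (n : Int) (qtd : Int) : Bool :=
  -- tem_div = False; …; if qtd_div == qtd: tem_div = True; return tem_div
  if pvLoopA n 1 0 = qtd then true else false

-- ===== PORT B =====
-- B's while loop: i from 1 while i*i <= n, APPENDING each divisor to the list `small`
def pvSmallDivs (n : Int) (i : Int) (small : List Int) : List Int :=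
  if i * i ≤ n then
    pvSmallDivs n (i + 1) (if PySem.Int.mod n i = 0 then small ++ [i] else small)
  else small
termination_by (n + 1 - i).toNat
decreasing_by
  have hi : i ≤ n := by nlinarith [mul_self_nonneg i, sq_nonneg (i - 1)]
  omega

def checa_quantidade_divisores_alt (n : Int) (qtd : Int) : Bool :=
  let small := pvSmallDivs n 1 []
  let total := 2 * (small.length : Int)
  -- `small and small[-1] * small[-1] == n`; small[-1] on a nonempty list is its last element
  let total2 :=
    if small ≠ [] ∧ PySem.List.pyGetD small (-1) 0 * PySem.List.pyGetD small (-1) 0 = n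
    then total - 1 else total
  decide (total2 = qtd)

-- ===== PRECONDITION & SPEC =====
def Spec_checa_quantidade_divisores (n : Int) (qtd : Int) (out : Bool) : Prop := out = checa_quantidade_divisores_alt n qtd
instance (n : Int) (qtd : Int) (out : Bool) : Decidable (Spec_checa_quantidade_divisores n qtd out) := by unfold Spec_checa_quantidade_divisores; infer_instance

-- ===== CLAIM (what is proved, stated in full; the proofs are below) =====
def Claim_equal_checa_quantidade_divisores : Prop := ∀ (n : Int) (qtd : Int), Dom_checa_quantidade_divisores n qtd → Spec_checa_quantidade_divisores n qtd (checa_quantidade_divisores n qtd)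

-- ===== LEMMAS AND PROOFS =====

-- proof-side model of B's list: the small divisors of n in increasing order from i
def pvSpecList (n : Int) (i : Int) : List Int :=
  if i * i ≤ n then
    (if PySem.Int.mod n i = 0 then [i] else []) ++ pvSpecList n (i + 1)
  else []
termination_by (n + 1 - i).toNat
decreasing_by
  have hi : i ≤ n := by nlinarith [mul_self_nonneg i, sq_nonneg (i - 1)]
  omega

theorem pvSmallDivs_eq (n : Int) : ∀ (k : Nat) (i : Int) (acc : List Int),
    (n + 1 - i).toNat = k → pvSmallDivs n i acc = acc ++ pvSpecList n i := by
  intro k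
  induction k using Nat.strong_induction_on with
  | _ k ih =>
    intro i acc hk
    rw [pvSmallDivs, pvSpecList]
    by_cases h : i * i ≤ n
    · have hi : i ≤ n := by nlinarith [mul_self_nonneg i, sq_nonneg (i - 1)]
      rw [if_pos h, if_pos h, ih (n + 1 - (i + 1)).toNat (by omega) (i + 1) _ rfl]
      split_ifs <;> simp
    · simp [h]

theorem pvSpecList_mem (n : Int) : ∀ (k : Nat) (i : Int), (n + 1 - i).toNat = k → 1 ≤ i →
    ∀ d, d ∈ pvSpecList n i ↔ i ≤ d ∧ d * d ≤ n ∧ PySem.Int.mod n d = 0 := by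
  intro k
  induction k using Nat.strong_induction_on with
  | _ k ih =>
    intro i hk hi1 d
    rw [pvSpecList]
    by_cases h : i * i ≤ n
    · have hi : i ≤ n := by nlinarith [mul_self_nonneg i, sq_nonneg (i - 1)]
      rw [if_pos h]
      have hrest := ih (n + 1 - (i + 1)).toNat (by omega) (i + 1) rfl (by omega) d
      by_cases hm : PySem.Int.mod n i = 0
      · simp only [if_pos hm, List.mem_append, List.mem_singleton, hrest]
        constructor
        · rintro (rfl | ⟨h1, h2, h3⟩)
          · exact ⟨le_refl _, h, hm⟩
          · exact ⟨by omega, h2, h3⟩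
        · rintro ⟨h1, h2, h3⟩
          rcases eq_or_lt_of_le h1 with rfl | hlt
          · exact Or.inl rfl
          · exact Or.inr ⟨by omega, h2, h3⟩
      · simp only [if_neg hm, List.nil_append, hrest]
        constructor
        · rintro ⟨h1, h2, h3⟩; exact ⟨by omega, h2, h3⟩
        · rintro ⟨h1, h2, h3⟩
          refine ⟨?_, h2, h3⟩
          rcases eq_or_lt_of_le h1 with rfl | hlt
          · exact absurd h3 hm
          · omega
    · rw [if_neg h]
      simp only [List.not_mem_nil, false_iff]
      rintro ⟨h1, h2, h3⟩
      nlinarith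

theorem pvSpecList_pairwise (n : Int) : ∀ (k : Nat) (i : Int), (n + 1 - i).toNat = k → 1 ≤ i →
    (pvSpecList n i).Pairwise (· < ·) := by
  intro k
  induction k using Nat.strong_induction_on with
  | _ k ih =>
    intro i hk hi1
    rw [pvSpecList]
    by_cases h : i * i ≤ n
    · have hi : i ≤ n := by nlinarith [mul_self_nonneg i, sq_nonneg (i - 1)]
      rw [if_pos h]
      have hrest := ih (n + 1 - (i + 1)).toNat (by omega) (i + 1) rfl (by omega)
      by_cases hm : PySem.Int.mod n i = 0
      · rw [if_pos hm]
        simp only [List.singleton_append, List.pairwise_cons]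
        refine ⟨fun x hx => ?_, hrest⟩
        have := (pvSpecList_mem n (n + 1 - (i + 1)).toNat (i + 1) rfl (by omega) x).mp hx
        omega
      · simpa [hm] using hrest
    · simp [h]

-- the last element of a strictly increasing list bounds every member
theorem pvLast_max (l : List Int) (hp : l.Pairwise (· < ·)) :
    ∀ x ∈ l, x ≤ l.getLast?.getD 0 := by
  induction l with
  | nil => intro x hx; cases hx
  | cons a t iht =>
    intro x hx
    cases t with
    | nil =>
      have hxa := List.mem_singleton.mp hx
      simp [hxa]
    | cons b t' =>
      rw [List.getLast?_cons_cons]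
      have hpt := (List.pairwise_cons.mp hp).2
      have hlast_mem : (b :: t').getLast?.getD 0 ∈ b :: t' := by
        have := List.getLast?_isSome (l := b :: t')
        rcases hmem : (b :: t').getLast? with _ | y
        · simp [hmem] at this
        · simpa using List.mem_of_getLast? hmem
      rcases List.mem_cons.mp hx with rfl | hx'
      · exact le_of_lt ((List.pairwise_cons.mp hp).1 _ hlast_mem)
      · exact iht hpt x hx'

-- cofactor facts: for 1 ≤ d dividing n ≥ 1, e = n / d is a divisor in [1, n] with d * e = n and n / e = d
theorem pvCof (n d : Int) (hn : 1 ≤ n) (hd : 1 ≤ d) (hdvd : d ∣ n) :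
    d * (n / d) = n ∧ 1 ≤ n / d ∧ n / d ≤ n ∧ (n / d) ∣ n ∧ n / (n / d) = d := by
  have hde : d * (n / d) = n := Int.mul_ediv_cancel' hdvd
  have hed : (n / d) ∣ n := ⟨d, by linarith [hde]⟩
  have he1 : 1 ≤ n / d := by nlinarith
  have hen : n / d ≤ n := Int.le_of_dvd (by omega) hed
  have hinv : n / (n / d) = d := by
    apply Int.ediv_eq_of_eq_mul_left (by omega)
    linarith [hde]
  exact ⟨hde, he1, hen, hed, hinv⟩

-- pairing d ↦ n / d: as many divisors above sqrt(n) as strictly below it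
theorem pvBij (n : Int) (hn : 1 ≤ n) :
    (((Finset.Ico 1 (n + 1)).filter (fun d => PySem.Int.mod n d = 0)).filter
        (fun d => ¬ d * d ≤ n)).card
      = (((Finset.Ico 1 (n + 1)).filter (fun d => PySem.Int.mod n d = 0)).filter
        (fun d => d * d < n)).card := by
  set D := (Finset.Ico 1 (n + 1)).filter (fun d => PySem.Int.mod n d = 0) with hD
  have hmemD : ∀ d, d ∈ D ↔ 1 ≤ d ∧ d ≤ n ∧ d ∣ n := by
    intro d
    simp only [hD, Finset.mem_filter, Finset.mem_Ico, PySem.Int.mod_eq_zero_iff_dvd]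
    omega
  apply Finset.card_nbij' (i := fun d => n / d) (j := fun e => n / e)
  · intro d hd
    simp only [Finset.mem_coe, Finset.mem_filter, hmemD] at hd
    obtain ⟨⟨hd1, hdn, hdvd⟩, hbig⟩ := hd
    obtain ⟨hde, he1, hen, hed, -⟩ := pvCof n d hn hd1 hdvd
    simp only [Finset.mem_coe, Finset.mem_filter, hmemD]
    refine ⟨⟨he1, hen, hed⟩, ?_⟩
    by_contra hc
    push Not at hc
    have h1 : n * (d * d) ≤ (n / d) * (n / d) * (d * d) :=
      mul_le_mul_of_nonneg_right hc (by positivity)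
    have h2 : n * n < n * (d * d) := by
      apply mul_lt_mul_of_pos_left (by omega) (by omega)
    have h3 : (n / d) * (n / d) * (d * d) = n * n := by
      have hr : (n / d) * (n / d) * (d * d) = (d * (n / d)) * (d * (n / d)) := by ring
      rw [hr, hde]
    linarith
  · intro e he
    simp only [Finset.mem_coe, Finset.mem_filter, hmemD] at he
    obtain ⟨⟨he1, hen, hedvd⟩, hsmall⟩ := he
    obtain ⟨hed, hd1, hdn, hddvd, -⟩ := pvCof n e hn he1 hedvd
    simp only [Finset.mem_coe, Finset.mem_filter, hmemD]
    refine ⟨⟨hd1, hdn, hddvd⟩, ?_⟩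
    intro hc
    have h1 : (n / e) * (n / e) * (e * e) ≤ n * (e * e) :=
      mul_le_mul_of_nonneg_right hc (by positivity)
    have h2 : n * (e * e) < n * n := by
      apply mul_lt_mul_of_pos_left (by omega) (by omega)
    have h3 : (n / e) * (n / e) * (e * e) = n * n := by
      have hr : (n / e) * (n / e) * (e * e) = (e * (n / e)) * (e * (n / e)) := by ring
      rw [hr, hed]
    linarith
  · intro d hd
    simp only [Finset.mem_coe, Finset.mem_filter, hmemD] at hd
    exact (pvCof n d hn hd.1.1 hd.1.2.2).2.2.2.2
  · intro e he
    simp only [Finset.mem_coe, Finset.mem_filter, hmemD] at he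
    exact (pvCof n e hn he.1.1 he.1.2.2).2.2.2.2

-- A's loop counts the divisors of n in [i, n]
theorem pvLoopA_inv (n : Int) : ∀ (k : Nat) (i c : Int), (n + 1 - i).toNat = k →
    pvLoopA n i c
      = c + (((Finset.Ico i (n + 1)).filter (fun d => PySem.Int.mod n d = 0)).card : Int) := by
  intro k
  induction k using Nat.strong_induction_on with
  | _ k ih =>
    intro i c hk
    rw [pvLoopA]
    by_cases h : i ≤ n
    · rw [if_pos h, ih (n + 1 - (i + 1)).toNat (by omega) (i + 1) _ rfl]
      have hsplit : Finset.Ico i (n + 1) = insert i (Finset.Ico (i + 1) (n + 1)) := by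
        ext x
        simp only [Finset.mem_Ico, Finset.mem_insert]
        omega
      rw [hsplit, Finset.filter_insert]
      have hnot : i ∉ (Finset.Ico (i + 1) (n + 1)).filter (fun d => PySem.Int.mod n d = 0) := by
        simp [Finset.mem_Ico]
      split_ifs with hm
      · rw [Finset.card_insert_of_notMem hnot]
        push_cast
        ring
      · ring
    · rw [if_neg h]
      have : Finset.Ico i (n + 1) = ∅ := Finset.Ico_eq_empty (by omega)
      simp [this]

-- the small-divisor list enumerates exactly the sqrt-bounded divisor set
theorem pvSpecList_length (n : Int) (hn : 1 ≤ n) :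
    ((pvSpecList n 1).length : Int)
      = (((Finset.Ico 1 (n + 1)).filter
          (fun d => d * d ≤ n ∧ PySem.Int.mod n d = 0)).card : Int) := by
  have hp := pvSpecList_pairwise n (n + 1 - 1).toNat 1 rfl (le_refl 1)
  have hnd : (pvSpecList n 1).Nodup := hp.imp ne_of_lt
  have hfin : (pvSpecList n 1).toFinset
      = (Finset.Ico 1 (n + 1)).filter (fun d => d * d ≤ n ∧ PySem.Int.mod n d = 0) := by
    ext d
    rw [List.mem_toFinset, pvSpecList_mem n (n + 1 - 1).toNat 1 rfl (le_refl 1) d]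
    simp only [Finset.mem_filter, Finset.mem_Ico]
    constructor
    · rintro ⟨h1, h2, h3⟩
      have : d ≤ n := by nlinarith
      exact ⟨⟨h1, by omega⟩, h2, h3⟩
    · rintro ⟨⟨h1, h2⟩, h3, h4⟩
      exact ⟨h1, h3, h4⟩
  rw [← hfin, List.toFinset_card_of_nodup hnd]

-- B's perfect-square branch fires exactly when n has an integer square root ≥ 1
theorem pvSquareCond (n : Int) :
    (pvSpecList n 1 ≠ [] ∧
        (pvSpecList n 1).getLast?.getD 0 * (pvSpecList n 1).getLast?.getD 0 = n)
      ↔ ∃ s : Int, 1 ≤ s ∧ s * s = n := by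
  have hmem := pvSpecList_mem n (n + 1 - 1).toNat 1 rfl (le_refl 1)
  have hp := pvSpecList_pairwise n (n + 1 - 1).toNat 1 rfl (le_refl 1)
  constructor
  · rintro ⟨hne, hsq⟩
    refine ⟨(pvSpecList n 1).getLast?.getD 0, ?_, hsq⟩
    have hlmem : (pvSpecList n 1).getLast?.getD 0 ∈ pvSpecList n 1 := by
      rcases hm : (pvSpecList n 1).getLast? with _ | y
      · exact absurd (List.getLast?_eq_none_iff.mp hm) hne
      · simpa using List.mem_of_getLast? hm
    exact ((hmem _).mp hlmem).1
  · rintro ⟨s, hs1, hsq⟩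
    have hsmem : s ∈ pvSpecList n 1 :=
      (hmem s).mpr ⟨hs1, le_of_eq hsq, (PySem.Int.mod_eq_zero_iff_dvd n s).mpr ⟨s, hsq.symm⟩⟩
    have hne : pvSpecList n 1 ≠ [] := fun h => by rw [h] at hsmem; cases hsmem
    have hlmem : (pvSpecList n 1).getLast?.getD 0 ∈ pvSpecList n 1 := by
      rcases hm : (pvSpecList n 1).getLast? with _ | y
      · exact absurd (List.getLast?_eq_none_iff.mp hm) hne
      · simpa using List.mem_of_getLast? hm
    have hle : s ≤ (pvSpecList n 1).getLast?.getD 0 := pvLast_max _ hp s hsmem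
    have hl := (hmem _).mp hlmem
    have : (pvSpecList n 1).getLast?.getD 0 = s := by nlinarith [hl.1, hl.2.1]
    exact ⟨hne, by rw [this]; exact hsq⟩

-- the count A computes equals the sqrt-paired count B computes
theorem pvKey (n : Int) :
    pvLoopA n 1 0 =
      (if pvSpecList n 1 ≠ [] ∧
            (pvSpecList n 1).getLast?.getD 0 * (pvSpecList n 1).getLast?.getD 0 = n
       then 2 * ((pvSpecList n 1).length : Int) - 1
       else 2 * ((pvSpecList n 1).length : Int)) := by
  rcases le_or_gt n 0 with hle | hn
  · have hA : pvLoopA n 1 0 = 0 := by rw [pvLoopA, if_neg (by omega)]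
    have hB : pvSpecList n 1 = [] := by
      rw [pvSpecList, if_neg (by omega : ¬ (1 : Int) * 1 ≤ n)]
    simp [hA, hB]
  · have hn1 : (1 : Int) ≤ n := by omega
    rw [pvLoopA_inv n (n + 1 - 1).toNat 1 0 rfl]
    set D := (Finset.Ico 1 (n + 1)).filter (fun d => PySem.Int.mod n d = 0) with hD
    -- split D at sqrt(n)
    have hsplit1 : (D.filter (fun d => d * d ≤ n)).card + (D.filter (fun d => ¬ d * d ≤ n)).card
        = D.card := Finset.card_filter_add_card_filter_not (s := D) (fun d => d * d ≤ n)
    have hbij := pvBij n hn1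
    rw [← hD] at hbij
    -- split the small part at exact squares
    have hsplit2 : ((D.filter (fun d => d * d ≤ n)).filter (fun d => d * d = n)).card
          + ((D.filter (fun d => d * d ≤ n)).filter (fun d => ¬ d * d = n)).card
        = (D.filter (fun d => d * d ≤ n)).card :=
      Finset.card_filter_add_card_filter_not (s := D.filter (fun d => d * d ≤ n)) _
    have heq2 : (D.filter (fun d => d * d ≤ n)).filter (fun d => d * d = n)
        = D.filter (fun d => d * d = n) := by
      rw [Finset.filter_filter]
      apply Finset.filter_congr
      intro d _
      constructor
      · tauto
      · intro h; exact ⟨le_of_eq h, h⟩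
    have heq3 : (D.filter (fun d => d * d ≤ n)).filter (fun d => ¬ d * d = n)
        = D.filter (fun d => d * d < n) := by
      rw [Finset.filter_filter]
      apply Finset.filter_congr
      intro d _
      constructor
      · rintro ⟨h1, h2⟩; omega
      · intro h; omega
    -- B's list length is the small part's cardinality
    have hsets : (Finset.Ico 1 (n + 1)).filter (fun d => d * d ≤ n ∧ PySem.Int.mod n d = 0)
        = D.filter (fun d => d * d ≤ n) := by
      rw [hD, Finset.filter_filter]
      apply Finset.filter_congr
      intro d _
      constructor
      · rintro ⟨h1, h2⟩; exact ⟨h2, h1⟩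
      · rintro ⟨h1, h2⟩; exact ⟨h2, h1⟩
    have hlen : ((pvSpecList n 1).length : Int) = ((D.filter (fun d => d * d ≤ n)).card : Int) := by
      rw [pvSpecList_length n hn1, hsets]
    rw [heq2, heq3] at hsplit2
    by_cases hex : ∃ s : Int, 1 ≤ s ∧ s * s = n
    · have hC : pvSpecList n 1 ≠ [] ∧
          (pvSpecList n 1).getLast?.getD 0 * (pvSpecList n 1).getLast?.getD 0 = n :=
        (pvSquareCond n).mpr hex
      rw [if_pos hC]
      obtain ⟨s, hs1, hss⟩ := hex
      have h1 : (D.filter (fun d => d * d = n)).card = 1 := by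
        have : D.filter (fun d => d * d = n) = {s} := by
          ext d
          simp only [Finset.mem_filter, hD, Finset.mem_Ico, Finset.mem_singleton,
            PySem.Int.mod_eq_zero_iff_dvd]
          constructor
          · rintro ⟨⟨⟨h1a, h1b⟩, h2⟩, h3⟩
            exact (mul_self_inj (by omega) (by nlinarith)).mp (by rw [h3, hss])
          · intro hds
            have h1d : (1 : Int) ≤ d := by rw [hds]; exact hs1
            have hdd : d * d = n := by rw [hds]; exact hss
            have hdn : d ≤ n := by nlinarith
            exact ⟨⟨⟨h1d, by omega⟩, ⟨d, hdd.symm⟩⟩, hdd⟩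
        rw [this, Finset.card_singleton]
      omega
    · have hC : ¬ (pvSpecList n 1 ≠ [] ∧
          (pvSpecList n 1).getLast?.getD 0 * (pvSpecList n 1).getLast?.getD 0 = n) :=
        fun h => hex ((pvSquareCond n).mp h)
      rw [if_neg hC]
      have h0 : (D.filter (fun d => d * d = n)).card = 0 := by
        rw [Finset.card_eq_zero, Finset.filter_eq_empty_iff]
        intro d hd hdd
        rw [hD, Finset.mem_filter, Finset.mem_Ico] at hd
        exact hex ⟨d, hd.1.1, hdd⟩
      omega

-- ===== VERDICT (by name: the statement is the Claim_ definition above) =====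
theorem checa_quantidade_divisores_spec : Claim_equal_checa_quantidade_divisores := by
  intro n qtd _
  unfold Spec_checa_quantidade_divisores checa_quantidade_divisores checa_quantidade_divisores_alt
  have hsmall : pvSmallDivs n 1 [] = pvSpecList n 1 := by
    simpa using pvSmallDivs_eq n (n + 1 - 1).toNat 1 [] rfl
  have hget : PySem.List.pyGetD (pvSpecList n 1) (-1) 0 = (pvSpecList n 1).getLast?.getD 0 := by
    simp [PySem.List.pyGetD, PySem.List.pyGet?_neg_one]
  simp only [hsmall, hget]
  rw [pvKey n]
  by_cases hP : (if pvSpecList n 1 ≠ [] ∧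
        (pvSpecList n 1).getLast?.getD 0 * (pvSpecList n 1).getLast?.getD 0 = n
      then 2 * ((pvSpecList n 1).length : Int) - 1
      else 2 * ((pvSpecList n 1).length : Int)) = qtd
  · simp [hP]
  · simp [hP]
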